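-- pv_equiv track=rewrite | github.com/zeshunzong/Notes | 764.py | get_down_hands
-- ===== SOURCE A (Python) =====
-- def get_down_hands(N, original):
--     down_hands = [[0 for x in range(N)] for y in range(N)]
--     #先把第二行搞好，如果第一行是1，那么他就是2
--     row = N-2
--     for i in range(1, N - 1):
--         #从第二列循环到倒数第二列
--         if original[N-1][i] == 1 and original[N-2][i] ==1:
--             #如果这个格子上边是1
--             down_hands[row][i] = 2
--         if original[N-1][i] == 0 and original[N-2][i] ==1:
--             down_hands[row][i] = 1
--
--     for r in range(N-3, 0, -1):
--         #从第三行循环到倒数第二行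
--         for c in range(1, N-1):
--             if original[r][c] == 1:
--                 down_hands[r][c] = down_hands[r+1][c]+1
--                 #比它下边原来的多一个
--     return down_hands
-- ===== SOURCE B (Python) =====
-- def get_down_hands(N, original):
--     def column(c):
--         # per-column run of consecutive 1s going down, kept in a scalar
--         if c < 1 or c > N - 2:
--             return [0] * N
--         vals = [0]  # bottom row (row N-1) is always 0 in the output
--         run = 0
--         for r in range(N - 2, 0, -1):
--             if original[r][c] != 1:
--                 run = 0
--             elif r == N - 2:
--                 run = 2 if original[N-1][c] == 1 else 1 if original[N-1][c] == 0 else 0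
--             else:
--                 run += 1
--             vals.append(run)
--         vals.append(0)  # top row (row 0) stays 0
--         vals.reverse()
--         return vals
--     cols = [column(c) for c in range(N)]
--     return [[cols[c][r] for c in range(N)] for r in range(N)]
-- ===== Notes on version B (the rewrite author's own statement) =====
-- stated objective: alternative
-- what changed: B traverses column-by-column, computing each column's run of consecutive down-hands bottom-up in a scalar accumulator and assembling the grid from the column lists, instead of A's row-major in-place grid updates that read down_hands[r+1][c] back from the grid.
import Mathlib
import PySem

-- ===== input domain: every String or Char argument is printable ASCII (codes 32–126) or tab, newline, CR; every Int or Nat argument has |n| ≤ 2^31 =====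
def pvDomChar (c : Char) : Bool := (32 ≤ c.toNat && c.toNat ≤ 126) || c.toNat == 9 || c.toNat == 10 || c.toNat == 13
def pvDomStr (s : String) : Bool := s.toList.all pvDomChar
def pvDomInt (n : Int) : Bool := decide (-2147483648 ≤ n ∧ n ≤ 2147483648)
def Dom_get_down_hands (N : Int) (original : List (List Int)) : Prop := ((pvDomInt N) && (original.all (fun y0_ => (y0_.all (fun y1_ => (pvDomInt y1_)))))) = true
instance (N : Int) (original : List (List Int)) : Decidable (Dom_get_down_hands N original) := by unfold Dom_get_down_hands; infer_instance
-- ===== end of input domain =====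

-- B computes the same grid column-by-column with a scalar run counter; A fills it row-major reading the grid back.

-- ===== PORT A =====
-- grid read g[r][c] (all indices are nonnegative where the Python executes them; the getD default is never hit on Pre_)
def gget (g : List (List Int)) (r c : Int) : Int := (g.getD r.toNat []).getD c.toNat 0
-- grid write g[r][c] = v
def gset (g : List (List Int)) (r c : Int) (v : Int) : List (List Int) :=
  g.set r.toNat ((g.getD r.toNat []).set c.toNat v)

def get_down_hands (N : Int) (original : List (List Int)) : List (List Int) :=
  let dh0 := List.replicate N.toNat (List.replicate N.toNat (0:Int))
  let row := N - 2
  let dh1 := (PySem.List.pyRange 1 (N-1) 1).foldl (fun g i =>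
      let g := if gget original (N-1) i = 1 ∧ gget original (N-2) i = 1 then gset g row i 2 else g
      if gget original (N-1) i = 0 ∧ gget original (N-2) i = 1 then gset g row i 1 else g) dh0
  (PySem.List.pyRange (N-3) 0 (-1)).foldl (fun g r =>
      (PySem.List.pyRange 1 (N-1) 1).foldl (fun g c =>
          if gget original r c = 1 then gset g r c (gget g (r+1) c + 1) else g) g) dh1

-- ===== PORT B =====
def columnB (N : Int) (original : List (List Int)) (c : Int) : List Int :=
  if c < 1 ∨ c > N - 2 then List.replicate N.toNat 0
  else
    let p := (PySem.List.pyRange (N-2) 0 (-1)).foldl (fun (p : List Int × Int) r =>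
      let run : Int :=
        if gget original r c ≠ 1 then 0
        else if r = N - 2 then
          (if gget original (N-1) c = 1 then 2 else if gget original (N-1) c = 0 then 1 else 0)
        else p.2 + 1
      (p.1 ++ [run], run)) ([0], 0)
    (p.1 ++ [0]).reverse

def get_down_hands_alt (N : Int) (original : List (List Int)) : List (List Int) :=
  let cols := (PySem.List.pyRange 0 N 1).map (columnB N original)
  (PySem.List.pyRange 0 N 1).map (fun r =>
    (PySem.List.pyRange 0 N 1).map (fun c => gget cols c r))

-- ===== PRECONDITION & SPEC =====
-- Exactly the inputs where Python A returns: for N ≥ 3 it indexes rows 1..N-1 at columns up to N-2.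
def Pre_get_down_hands (N : Int) (original : List (List Int)) : Prop :=
  N ≤ 2 ∨ (N ≤ (original.length : Int) ∧
    ∀ row ∈ (original.take N.toNat).drop 1, N - 1 ≤ (row.length : Int))
instance (N : Int) (original : List (List Int)) : Decidable (Pre_get_down_hands N original) := by
  unfold Pre_get_down_hands; infer_instance

def pvWitness_get_down_hands : Int × List (List Int) := (3, [[0,0,0],[0,1,0],[1,1,1]])

def Spec_get_down_hands (N : Int) (original : List (List Int)) (out : List (List Int)) : Prop := out = get_down_hands_alt N original
instance (N : Int) (original : List (List Int)) (out : List (List Int)) : Decidable (Spec_get_down_hands N original out) := by unfold Spec_get_down_hands; infer_instance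

-- ===== CLAIM (what is proved, stated in full; the proofs are below) =====
def Claim_equal_get_down_hands : Prop := ∀ (N : Int) (original : List (List Int)), Dom_get_down_hands N original → Pre_get_down_hands N original → Spec_get_down_hands N original (get_down_hands N original)

-- ===== LEMMAS AND PROOFS =====

-- a grid given pointwise by a function on an n × n index square
def mkG (n : Nat) (F : Nat → Nat → Int) : List (List Int) :=
  (List.range n).map (fun r => (List.range n).map (F r))

-- the value A's first loop writes at row N-2, column c (0 when no branch fires)
def baseV (N : Int) (o : List (List Int)) (c : Int) : Int :=
  if gget o (N-2) c = 1 then (if gget o (N-1) c = 1 then 2 else if gget o (N-1) c = 0 then 1 else 0) else 0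

-- run value k rows above row N-2
def fsp (N : Int) (o : List (List Int)) (c : Int) : Nat → Int
  | 0 => baseV N o c
  | k+1 => if gget o (N-2-((k+1:Nat):Int)) c = 1 then fsp N o c k + 1 else 0

-- the final value of cell (r, c) in both programs
def cellF (N : Int) (o : List (List Int)) (r c : Nat) : Int :=
  if 1 ≤ r ∧ (r:Int) ≤ N-2 ∧ 1 ≤ c ∧ (c:Int) ≤ N-2 then fsp N o ↑c (N-2-(r:Int)).toNat else 0

lemma getD_map_range_ge {β : Type} (f : Nat → β) (m i : Nat) (d : β) (h : m ≤ i) :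
    ((List.range m).map f).getD i d = d := by
  rw [List.getD_eq_getElem?_getD, List.getElem?_eq_none (by simpa using h)]
  rfl

lemma mkG_congr {n : Nat} {F G : Nat → Nat → Int}
    (h : ∀ r c, r < n → c < n → F r c = G r c) : mkG n F = mkG n G := by
  unfold mkG
  apply List.map_congr_left
  intro r hr
  apply List.map_congr_left
  intro c hc
  exact h r c (List.mem_range.mp hr) (List.mem_range.mp hc)

lemma replicate_eq_mkG (n : Nat) :
    List.replicate n (List.replicate n (0:Int)) = mkG n (fun _ _ => 0) := by
  apply List.ext_getElem
  · simp [mkG]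
  · intro i h1 h2
    apply List.ext_getElem <;> simp [mkG]

lemma gget_mkG (n : Nat) (F : Nat → Nat → Int) (r c : Nat) :
    gget (mkG n F) ↑r ↑c = if r < n ∧ c < n then F r c else 0 := by
  unfold gget mkG
  simp only [Int.toNat_natCast]
  by_cases hr : r < n
  · rw [PySem.List.getD_map_range _ _ _ _ hr]
    by_cases hc : c < n
    · rw [PySem.List.getD_map_range _ _ _ _ hc, if_pos ⟨hr, hc⟩]
    · rw [getD_map_range_ge _ _ _ _ (by omega), if_neg (by omega)]
  · rw [getD_map_range_ge _ _ _ _ (by omega), if_neg (by omega)]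
    rfl

lemma gget_mkG' (n : Nat) (F : Nat → Nat → Int) (ri ci : Int)
    (hr0 : 0 ≤ ri) (hc0 : 0 ≤ ci) :
    gget (mkG n F) ri ci = if ri.toNat < n ∧ ci.toNat < n then F ri.toNat ci.toNat else 0 := by
  obtain ⟨r, rfl⟩ : ∃ r : Nat, ri = ↑r := ⟨ri.toNat, by omega⟩
  obtain ⟨c, rfl⟩ : ∃ c : Nat, ci = ↑c := ⟨ci.toNat, by omega⟩
  simp only [Int.toNat_natCast]
  exact gget_mkG n F r c

lemma gset_mkG (n : Nat) (F : Nat → Nat → Int) (r c : Nat) (v : Int)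
    (hr : r < n) (hc : c < n) :
    gset (mkG n F) ↑r ↑c v = mkG n (fun r' c' => if r' = r ∧ c' = c then v else F r' c') := by
  unfold gset
  simp only [Int.toNat_natCast]
  have hrow : (mkG n F).getD r [] = (List.range n).map (F r) := by
    unfold mkG; exact PySem.List.getD_map_range _ _ _ _ hr
  rw [hrow]
  apply List.ext_getElem
  · simp [mkG]
  · intro i h1 h2
    have hin : i < n := by simpa [mkG] using h2
    rw [List.getElem_set]
    by_cases hri : r = i
    · rw [if_pos hri]
      subst hri
      apply List.ext_getElem
      · simp [mkG]
      · intro j hj1 hj2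
        have hjn : j < n := by simpa using hj1
        rw [List.getElem_set]
        simp only [mkG, List.getElem_map, List.getElem_range]
        by_cases hcj : c = j
        · simp [hcj]
        · have hcj' : j ≠ c := fun h => hcj h.symm
          simp [hcj']
          exact fun h => absurd h hcj
    · rw [if_neg hri]
      simp only [mkG, List.getElem_map, List.getElem_range]
      apply List.map_congr_left
      intro j _
      exact (if_neg (by rintro ⟨h, -⟩; exact hri h.symm)).symm

lemma gset_mkG' (n : Nat) (F : Nat → Nat → Int) (ri ci : Int) (v : Int)
    (hr0 : 0 ≤ ri) (hc0 : 0 ≤ ci) (hrn : ri < (n:Int)) (hcn : ci < (n:Int)) :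
    gset (mkG n F) ri ci v
      = mkG n (fun r' c' => if r' = ri.toNat ∧ c' = ci.toNat then v else F r' c') := by
  obtain ⟨r, rfl⟩ : ∃ r : Nat, ri = ↑r := ⟨ri.toNat, by omega⟩
  obtain ⟨c, rfl⟩ : ∃ c : Nat, ci = ↑c := ⟨ci.toNat, by omega⟩
  simp only [Int.toNat_natCast]
  exact gset_mkG n F r c v (by omega) (by omega)

lemma cellF_base (N : Int) (o : List (List Int)) (c : Nat) (hN : 3 ≤ N)
    (hc1 : 1 ≤ c) (hc2 : (c:Int) ≤ N-2) :
    cellF N o (N-2).toNat c = baseV N o ↑c := by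
  have hcond : 1 ≤ (N-2).toNat ∧ (((N-2).toNat:Nat):Int) ≤ N-2 ∧ 1 ≤ c ∧ (c:Int) ≤ N-2 := by omega
  unfold cellF
  rw [if_pos hcond]
  rw [show (N - 2 - (((N-2).toNat : Nat):Int)).toNat = 0 from by omega]
  rfl

lemma cellF_succ (N : Int) (o : List (List Int)) (r c : Nat)
    (h1 : 1 ≤ r) (h2 : (r:Int) ≤ N-3) (hc1 : 1 ≤ c) (hc2 : (c:Int) ≤ N-2) :
    cellF N o r c = if gget o ↑r ↑c = 1 then cellF N o (r+1) c + 1 else 0 := by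
  set k := (N - 2 - ((r:Int)+1)).toNat with hkdef
  have hcc : cellF N o (r+1) c = fsp N o ↑c k := by
    have hA : ((r+1:Nat):Int) ≤ N-2 := by push_cast; omega
    have hcond : 1 ≤ r+1 ∧ ((r+1:Nat):Int) ≤ N-2 ∧ 1 ≤ c ∧ (c:Int) ≤ N-2 :=
      ⟨Nat.le_add_left 1 r, hA, hc1, hc2⟩
    unfold cellF
    rw [if_pos hcond]
    congr 1 <;> omega
  rw [hcc]
  unfold cellF
  rw [if_pos (by omega)]
  rw [show (N - 2 - ((r:Nat):Int)).toNat = k + 1 from by omega]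
  simp only [fsp]
  rw [show ((N:Int) - 2 - ((k+1:Nat):Int)) = ((r:Nat):Int) from by push_cast; omega]

lemma cellF_out_row (N : Int) (o : List (List Int)) (r c : Nat)
    (h : ¬ (1 ≤ r ∧ (r:Int) ≤ N-2)) : cellF N o r c = 0 := by
  unfold cellF
  rw [if_neg (by omega)]

lemma cellF_out_col (N : Int) (o : List (List Int)) (r c : Nat)
    (h : ¬ (1 ≤ c ∧ (c:Int) ≤ N-2)) : cellF N o r c = 0 := by
  unfold cellF
  rw [if_neg (by omega)]

lemma cellF_zero (N : Int) (o : List (List Int)) (r c : Nat)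
    (hr1 : 1 ≤ r) (hr2 : (r:Int) ≤ N-2) (hne : ¬ gget o ↑r ↑c = 1) : cellF N o r c = 0 := by
  by_cases hcb : 1 ≤ c ∧ (c:Int) ≤ N-2
  · by_cases hr3 : (r:Int) ≤ N-3
    · rw [cellF_succ N o r c hr1 hr3 hcb.1 hcb.2, if_neg hne]
    · have hre : r = (N-2).toNat := by omega
      have hca : ((r:Nat):Int) = N - 2 := by omega
      rw [hca] at hne
      rw [hre, cellF_base N o c (by omega) hcb.1 hcb.2]
      unfold baseV
      rw [if_neg hne]
  · exact cellF_out_col N o r c hcb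

-- A's first loop fills row N-2, columns 1..N-2, with baseV
lemma stageA1 (N : Int) (o : List (List Int)) (hN : 3 ≤ N) :
    (PySem.List.pyRange 1 (N-1) 1).foldl (fun g i =>
      if gget o (N-1) i = 0 ∧ gget o (N-2) i = 1
      then gset (if gget o (N-1) i = 1 ∧ gget o (N-2) i = 1 then gset g (N-2) i 2 else g) (N-2) i 1
      else (if gget o (N-1) i = 1 ∧ gget o (N-2) i = 1 then gset g (N-2) i 2 else g))
      (mkG N.toNat (fun _ _ => 0))
    = mkG N.toNat (fun r c => if r = (N-2).toNat ∧ 1 ≤ c ∧ (c:Int) ≤ N-2 then baseV N o ↑c else 0) := by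
  have key : ∀ m : Nat, (m:Int) ≤ N - 2 →
      (PySem.List.pyRange 1 (1+(m:Int)) 1).foldl (fun g i =>
        if gget o (N-1) i = 0 ∧ gget o (N-2) i = 1
        then gset (if gget o (N-1) i = 1 ∧ gget o (N-2) i = 1 then gset g (N-2) i 2 else g) (N-2) i 1
        else (if gget o (N-1) i = 1 ∧ gget o (N-2) i = 1 then gset g (N-2) i 2 else g))
        (mkG N.toNat (fun _ _ => 0))
      = mkG N.toNat (fun r c => if r = (N-2).toNat ∧ 1 ≤ c ∧ (c:Int) < 1 + (m:Int) then baseV N o ↑c else 0) := by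
    intro m
    induction m with
    | zero =>
      intro _
      rw [show (1:Int) + ((0:Nat):Int) = 1 from by norm_num, PySem.List.pyRange_one_eq_nil le_rfl]
      simp only [List.foldl_nil]
      exact mkG_congr (by intro r c _ _; rw [if_neg (by omega)])
    | succ m ih =>
      intro hm
      have hm' : (m:Int) ≤ N - 2 := by push_cast at hm; omega
      rw [show (1:Int) + ((m+1:Nat):Int) = (1 + (m:Int)) + 1 from by push_cast; ring,
        PySem.List.pyRange_one_succ_right (by omega), List.foldl_append, ih hm']
      simp only [List.foldl_cons, List.foldl_nil]
      have hmN : (1:Int) + (m:Int) < (N.toNat:Int) := by push_cast at hm; omega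
      by_cases h1 : gget o (N-1) (1+(m:Int)) = 1 ∧ gget o (N-2) (1+(m:Int)) = 1
      · rw [if_pos h1, if_neg (by rintro ⟨ha, -⟩; rw [h1.1] at ha; norm_num at ha)]
        rw [gset_mkG' N.toNat _ (N-2) (1+(m:Int)) 2 (by omega) (by omega) (by omega) hmN]
        apply mkG_congr
        intro r c hr hc
        by_cases hcell : r = (N-2).toNat ∧ c = ((1:Int)+(m:Int)).toNat
        · rw [if_pos hcell, if_pos (by omega)]
          unfold baseV
          rw [show ((c:Nat):Int) = 1 + (m:Int) from by omega]
          rw [if_pos h1.2, if_pos h1.1]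
        · rw [if_neg hcell]
          by_cases hra : r = (N-2).toNat ∧ 1 ≤ c ∧ (c:Int) < 1 + (m:Int)
          · rw [if_pos hra, if_pos (by omega)]
          · rw [if_neg hra, if_neg (by omega)]
      · rw [if_neg h1]
        by_cases h2 : gget o (N-1) (1+(m:Int)) = 0 ∧ gget o (N-2) (1+(m:Int)) = 1
        · rw [if_pos h2]
          rw [gset_mkG' N.toNat _ (N-2) (1+(m:Int)) 1 (by omega) (by omega) (by omega) hmN]
          apply mkG_congr
          intro r c hr hc
          by_cases hcell : r = (N-2).toNat ∧ c = ((1:Int)+(m:Int)).toNat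
          · rw [if_pos hcell, if_pos (by omega)]
            unfold baseV
            rw [show ((c:Nat):Int) = 1 + (m:Int) from by omega]
            rw [if_pos h2.2, if_neg (by rw [h2.1]; norm_num), if_pos h2.1]
          · rw [if_neg hcell]
            by_cases hra : r = (N-2).toNat ∧ 1 ≤ c ∧ (c:Int) < 1 + (m:Int)
            · rw [if_pos hra, if_pos (by omega)]
            · rw [if_neg hra, if_neg (by omega)]
        · rw [if_neg h2]
          apply mkG_congr
          intro r c hr hc
          by_cases hra : r = (N-2).toNat ∧ 1 ≤ c ∧ (c:Int) < 1 + (m:Int)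
          · rw [if_pos hra, if_pos (by omega)]
          · rw [if_neg hra]
            by_cases hnew : r = (N-2).toNat ∧ 1 ≤ c ∧ (c:Int) < 1 + (m:Int) + 1
            · rw [if_pos hnew]
              have hci : ((c:Nat):Int) = 1 + (m:Int) := by push_cast at hra hnew ⊢; omega
              unfold baseV
              rw [hci]
              by_cases hb : gget o (N-2) (1+(m:Int)) = 1
              · rw [if_pos hb, if_neg (fun ha => h1 ⟨ha, hb⟩), if_neg (fun ha => h2 ⟨ha, hb⟩)]
              · rw [if_neg hb]
            · rw [if_neg hnew]
  have hfin := key (N-2).toNat (by omega)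
  rw [show (1:Int) + (((N-2).toNat:Nat):Int) = N - 1 from by omega] at hfin
  rw [hfin]
  apply mkG_congr
  intro r c hr hc
  by_cases h : r = (N-2).toNat ∧ 1 ≤ c ∧ (c:Int) < N - 1
  · rw [if_pos h, if_pos (by omega)]
  · rw [if_neg h, if_neg (by omega)]

-- A's second loop extends the runs upward, row by row
lemma stageA2 (N : Int) (o : List (List Int)) (hN : 3 ≤ N) :
    (PySem.List.pyRange (N-3) 0 (-1)).foldl (fun g r =>
      (PySem.List.pyRange 1 (N-1) 1).foldl (fun g c =>
          if gget o r c = 1 then gset g r c (gget g (r+1) c + 1) else g) g)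
      (mkG N.toNat (fun r c => if r = (N-2).toNat ∧ 1 ≤ c ∧ (c:Int) ≤ N-2 then baseV N o ↑c else 0))
    = mkG N.toNat (cellF N o) := by
  rw [PySem.List.pyRange_neg_one, show (N:Int) - 3 - 0 = N - 3 from by ring, List.foldl_map]
  have key : ∀ j : Nat, j ≤ (N-3).toNat →
      (List.range j).foldl (fun g (k : Nat) =>
        (PySem.List.pyRange 1 (N-1) 1).foldl (fun g c =>
          if gget o (N-3-(k:Int)) c = 1 then gset g (N-3-(k:Int)) c (gget g ((N-3-(k:Int))+1) c + 1) else g) g)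
        (mkG N.toNat (fun r c => if r = (N-2).toNat ∧ 1 ≤ c ∧ (c:Int) ≤ N-2 then baseV N o ↑c else 0))
      = mkG N.toNat (fun r c => if N - 2 - (j:Int) ≤ (r:Int) then cellF N o r c else 0) := by
    intro j
    induction j with
    | zero =>
      intro _
      simp only [List.range_zero, List.foldl_nil]
      apply mkG_congr
      intro r c hr hc
      by_cases h : r = (N-2).toNat ∧ 1 ≤ c ∧ (c:Int) ≤ N-2
      · rw [if_pos h, if_pos (by push_cast; omega)]
        rw [h.1, cellF_base N o c hN h.2.1 h.2.2]
      · rw [if_neg h]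
        by_cases h2 : N - 2 - ((0:Nat):Int) ≤ (r:Int)
        · rw [if_pos h2]
          by_cases h3 : 1 ≤ c ∧ (c:Int) ≤ N-2
          · exact (cellF_out_row N o r c (by push_cast at h2; omega)).symm
          · exact (cellF_out_col N o r c h3).symm
        · rw [if_neg h2]
    | succ j ih =>
      intro hj
      rw [List.range_succ, List.foldl_append, ih (by omega)]
      simp only [List.foldl_cons, List.foldl_nil]
      set ρ : Int := N - 3 - (j:Int) with hρdef
      have hρ1 : 1 ≤ ρ := by omega
      have inner : ∀ m : Nat, (m:Int) ≤ N - 2 →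
          (PySem.List.pyRange 1 (1+(m:Int)) 1).foldl (fun g c =>
            if gget o ρ c = 1 then gset g ρ c (gget g (ρ+1) c + 1) else g)
            (mkG N.toNat (fun r c => if N - 2 - (j:Int) ≤ (r:Int) then cellF N o r c else 0))
          = mkG N.toNat (fun r c => if r = ρ.toNat ∧ 1 ≤ c ∧ (c:Int) < 1 + (m:Int)
              then cellF N o r c
              else if N - 2 - (j:Int) ≤ (r:Int) then cellF N o r c else 0) := by
        intro m
        induction m with
        | zero =>
          intro _
          rw [show (1:Int) + ((0:Nat):Int) = 1 from by norm_num, PySem.List.pyRange_one_eq_nil le_rfl]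
          simp only [List.foldl_nil]
          exact mkG_congr (by
            intro r c _ _
            rw [if_neg (show ¬(r = ρ.toNat ∧ 1 ≤ c ∧ (c:Int) < 1) from by omega)])
        | succ m ihm =>
          intro hm
          have hm' : (m:Int) ≤ N - 2 := by push_cast at hm; omega
          rw [show (1:Int) + ((m+1:Nat):Int) = (1 + (m:Int)) + 1 from by push_cast; ring,
            PySem.List.pyRange_one_succ_right (by omega), List.foldl_append, ihm hm']
          simp only [List.foldl_cons, List.foldl_nil]
          have hmN : (1:Int) + (m:Int) < (N.toNat:Int) := by push_cast at hm; omega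
          have hg2 : ((ρ.toNat:Nat):Int) = ρ := by omega
          have hg3 : ((m+1:Nat):Int) = 1+(m:Int) := by push_cast; ring
          by_cases hg : gget o ρ (1+(m:Int)) = 1
          · rw [if_pos hg]
            have hval : gget (mkG N.toNat (fun r c => if r = ρ.toNat ∧ 1 ≤ c ∧ (c:Int) < 1 + (m:Int)
                then cellF N o r c
                else if N - 2 - (j:Int) ≤ (r:Int) then cellF N o r c else 0)) (ρ+1) (1+(m:Int))
                = cellF N o (ρ.toNat+1) (m+1) := by
              rw [gget_mkG' _ _ _ _ (by omega) (by omega),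
                if_pos (show (ρ+1).toNat < N.toNat ∧ ((1:Int)+(m:Int)).toNat < N.toNat from by omega)]
              show (if (ρ+1).toNat = ρ.toNat ∧ 1 ≤ ((1:Int)+(m:Int)).toNat ∧ ((((1:Int)+(m:Int)).toNat:Nat):Int) < 1 + (m:Int)
                  then cellF N o (ρ+1).toNat ((1:Int)+(m:Int)).toNat
                  else if N - 2 - (j:Int) ≤ (((ρ+1).toNat:Nat):Int) then cellF N o (ρ+1).toNat ((1:Int)+(m:Int)).toNat else 0)
                = cellF N o (ρ.toNat+1) (m+1)
              rw [if_neg (show ¬((ρ+1).toNat = ρ.toNat ∧ 1 ≤ ((1:Int)+(m:Int)).toNat ∧ ((((1:Int)+(m:Int)).toNat:Nat):Int) < 1 + (m:Int)) from by omega)]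
              rw [if_pos (show N - 2 - (j:Int) ≤ (((ρ+1).toNat:Nat):Int) from by omega)]
              rw [show ((ρ:Int)+1).toNat = ρ.toNat + 1 from by omega,
                show ((1:Int)+(m:Int)).toNat = m + 1 from by omega]
            rw [hval, gset_mkG' N.toNat _ ρ (1+(m:Int)) _ (by omega) (by omega) (by omega) hmN]
            have hstep : cellF N o (ρ.toNat+1) (m+1) + 1 = cellF N o ρ.toNat (m+1) := by
              rw [cellF_succ N o ρ.toNat (m+1) (by omega) (by omega) (by omega) (by push_cast at hm; omega)]
              rw [if_pos (by rw [hg2, hg3]; exact hg)]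
            rw [hstep]
            apply mkG_congr
            intro r c hr hc
            by_cases hcell : r = ρ.toNat ∧ c = ((1:Int)+(m:Int)).toNat
            · rw [if_pos hcell,
                if_pos (show r = ρ.toNat ∧ 1 ≤ c ∧ (c:Int) < 1 + (m:Int) + 1 from by omega)]
              have hc1 : c = m+1 := by omega
              rw [hcell.1, hc1]
            · rw [if_neg hcell]
              by_cases hra : r = ρ.toNat ∧ 1 ≤ c ∧ (c:Int) < 1 + (m:Int)
              · rw [if_pos hra,
                  if_pos (show r = ρ.toNat ∧ 1 ≤ c ∧ (c:Int) < 1 + (m:Int) + 1 from by omega)]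
              · rw [if_neg hra,
                  if_neg (show ¬(r = ρ.toNat ∧ 1 ≤ c ∧ (c:Int) < 1 + (m:Int) + 1) from by omega)]
          · rw [if_neg hg]
            apply mkG_congr
            intro r c hr hc
            by_cases hra : r = ρ.toNat ∧ 1 ≤ c ∧ (c:Int) < 1 + (m:Int)
            · rw [if_pos hra,
                if_pos (show r = ρ.toNat ∧ 1 ≤ c ∧ (c:Int) < 1 + (m:Int) + 1 from by omega)]
            · rw [if_neg hra]
              by_cases hnew : r = ρ.toNat ∧ 1 ≤ c ∧ (c:Int) < 1 + (m:Int) + 1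
              · rw [if_pos hnew]
                have hcm : c = m+1 := by omega
                rw [if_neg (show ¬(N - 2 - (j:Int) ≤ (r:Int)) from by omega)]
                rw [hnew.1, hcm]
                refine ((cellF_zero N o ρ.toNat (m+1) (by omega) (by omega) ?_).symm)
                rw [hg2, hg3]
                exact hg
              · rw [if_neg hnew]
      have hin := inner (N-2).toNat (by omega)
      rw [show (1:Int) + (((N-2).toNat:Nat):Int) = N - 1 from by omega] at hin
      refine hin.trans ?_
      apply mkG_congr
      intro r c hr hc
      by_cases h1 : r = ρ.toNat ∧ 1 ≤ c ∧ (c:Int) < N - 1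
      · rw [if_pos h1, if_pos (by omega)]
      · rw [if_neg h1]
        by_cases h2 : N - 2 - (j:Int) ≤ (r:Int)
        · rw [if_pos h2, if_pos (by push_cast; omega)]
        · rw [if_neg h2]
          by_cases h3 : N - 2 - ((j+1:Nat):Int) ≤ (r:Int)
          · rw [if_pos h3]
            exact (cellF_out_col N o r c (by push_cast at h3; omega)).symm
          · rw [if_neg h3]
  have hk := key (N-3).toNat le_rfl
  refine hk.trans ?_
  apply mkG_congr
  intro r c hr hc
  by_cases h : N - 2 - (((N-3).toNat:Nat):Int) ≤ (r:Int)
  · rw [if_pos h]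
  · rw [if_neg h]
    exact (cellF_out_row N o r c (by omega)).symm

-- B's column list is exactly the cellF column
lemma columnB_eq (N : Int) (o : List (List Int)) (c : Nat) (hN : 3 ≤ N) :
    columnB N o ↑c = (List.range N.toNat).map (fun r => cellF N o r c) := by
  unfold columnB
  by_cases hc : ((c:Nat):Int) < 1 ∨ ((c:Nat):Int) > N - 2
  · rw [if_pos hc]
    apply List.ext_getElem
    · simp
    · intro i h1 h2
      rw [List.getElem_replicate, List.getElem_map, List.getElem_range]
      exact (cellF_out_col N o i c (by omega)).symm
  · rw [if_neg hc]
    rw [PySem.List.pyRange_neg_one, show (N:Int) - 2 - 0 = N - 2 from by ring, List.foldl_map]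
    have key : ∀ j : Nat, j ≤ (N-2).toNat →
        (List.range j).foldl (fun (p : List Int × Int) (k : Nat) =>
          (p.1 ++ [if gget o (N-2-(k:Int)) ↑c ≠ 1 then 0
              else if (N-2-(k:Int)) = N - 2 then
                (if gget o (N-1) ↑c = 1 then 2 else if gget o (N-1) ↑c = 0 then 1 else 0)
              else p.2 + 1],
           if gget o (N-2-(k:Int)) ↑c ≠ 1 then 0
              else if (N-2-(k:Int)) = N - 2 then
                (if gget o (N-1) ↑c = 1 then 2 else if gget o (N-1) ↑c = 0 then 1 else 0)
              else p.2 + 1)) ([0], 0)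
        = ((0:Int) :: (List.range j).map (fun (t : Nat) => cellF N o (N-2-(t:Int)).toNat c),
           if j = 0 then 0 else cellF N o (N-1-(j:Int)).toNat c) := by
      intro j
      induction j with
      | zero =>
        intro _
        simp
      | succ j ihj =>
        intro hj
        rw [List.range_succ, List.foldl_append, ihj (by omega)]
        simp only [List.foldl_cons, List.foldl_nil]
        have hρtn : (((N-2-(j:Int)).toNat:Nat):Int) = N - 2 - (j:Int) := by omega
        have hrun : (if gget o (N-2-(j:Int)) ↑c ≠ 1 then 0
              else if (N-2-(j:Int)) = N - 2 then
                (if gget o (N-1) ↑c = 1 then 2 else if gget o (N-1) ↑c = 0 then 1 else 0)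
              else (if j = 0 then 0 else cellF N o (N-1-(j:Int)).toNat c) + 1)
            = cellF N o (N-2-(j:Int)).toNat c := by
          by_cases hne : gget o (N-2-(j:Int)) ↑c ≠ 1
          · rw [if_pos hne]
            exact (cellF_zero N o (N-2-(j:Int)).toNat c (by omega) (by omega)
              (by rw [hρtn]; exact hne)).symm
          · rw [if_neg hne]
            push_neg at hne
            by_cases hbase : (N-2-(j:Int)) = N - 2
            · have hj0 : j = 0 := by omega
              rw [if_pos hbase]
              subst hj0
              rw [show ((N:Int)-2-((0:Nat):Int)).toNat = (N-2).toNat from by omega,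
                cellF_base N o c hN (by omega) (by omega)]
              have hne' : gget o (N-2) ↑c = 1 := by
                rwa [show (N:Int)-2-((0:Nat):Int) = N-2 from by omega] at hne
              unfold baseV
              rw [if_pos hne']
            · have hj1 : 1 ≤ j := by omega
              rw [if_neg hbase, if_neg (show ¬(j = 0) from by omega)]
              rw [cellF_succ N o (N-2-(j:Int)).toNat c (by omega) (by omega) (by omega) (by omega)]
              rw [if_pos (show gget o ((((N-2-(j:Int)).toNat:Nat)):Int) ↑c = 1 from by rw [hρtn]; exact hne)]
              rw [show ((N:Int)-1-((j:Nat):Int)).toNat = (N-2-(j:Int)).toNat + 1 from by omega]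
        rw [hrun]
        refine Prod.ext ?_ ?_
        · simp [List.range_succ]
        · rw [if_neg (show ¬(j + 1 = 0) from by omega)]
          rw [show ((N:Int)-1-((j+1:Nat):Int)).toNat = (N-2-(j:Int)).toNat from by push_cast; omega]
    have goal2 : ((((List.range (N-2).toNat).foldl (fun (p : List Int × Int) (k : Nat) =>
          (p.1 ++ [if gget o (N-2-(k:Int)) ↑c ≠ 1 then 0
              else if (N-2-(k:Int)) = N - 2 then
                (if gget o (N-1) ↑c = 1 then 2 else if gget o (N-1) ↑c = 0 then 1 else 0)
              else p.2 + 1],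
           if gget o (N-2-(k:Int)) ↑c ≠ 1 then 0
              else if (N-2-(k:Int)) = N - 2 then
                (if gget o (N-1) ↑c = 1 then 2 else if gget o (N-1) ↑c = 0 then 1 else 0)
              else p.2 + 1)) ([0], 0)).1) ++ [0]).reverse
        = (List.range N.toNat).map (fun r => cellF N o r c) := by
      rw [key (N-2).toNat le_rfl]
      have hMrev : ((List.range (N-2).toNat).map (fun (t : Nat) => cellF N o (N-2-(t:Int)).toNat c)).reverse
          = (List.range (N-2).toNat).map (fun (t : Nat) => cellF N o (t+1) c) := by
        apply List.ext_getElem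
        · simp
        · intro t ht1 ht2
          have htn : t < (N-2).toNat := by simpa using ht2
          rw [List.getElem_reverse]
          simp only [List.getElem_map, List.getElem_range, List.length_map, List.length_range]
          rw [show (N - 2 - (((N-2).toNat - 1 - t:Nat):Int)).toNat = t + 1 from by omega]
      show (((0:Int) :: (List.range (N-2).toNat).map (fun (t : Nat) => cellF N o (N-2-(t:Int)).toNat c)) ++ [0]).reverse
          = (List.range N.toNat).map (fun r => cellF N o r c)
      rw [List.reverse_append, List.reverse_cons, List.reverse_cons, hMrev]
      simp only [List.reverse_nil, List.nil_append, List.singleton_append]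
      apply List.ext_getElem
      · simp only [List.length_append, List.length_cons,
          List.length_map, List.length_range, List.length_nil]
        omega
      · intro i h1 h2
        have hiN : i < N.toNat := by simpa using h2
        rcases Nat.eq_zero_or_pos i with hi0 | hip
        · subst hi0
          rw [List.getElem_cons_zero, List.getElem_map, List.getElem_range]
          exact (cellF_out_row N o 0 c (by omega)).symm
        · obtain ⟨i', rfl⟩ : ∃ i', i = i' + 1 := ⟨i - 1, by omega⟩
          rw [List.getElem_cons_succ]
          by_cases hi' : i' < (N-2).toNat
          · rw [List.getElem_append_left (by simpa using hi')]
            simp only [List.getElem_map, List.getElem_range]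
          · rw [List.getElem_append_right (by simpa using hi')]
            simp only [List.length_map, List.length_range]
            rw [List.getElem_singleton, List.getElem_map, List.getElem_range]
            exact (cellF_out_row N o (i'+1) c (by omega)).symm
    exact goal2

lemma main_eq (N : Int) (o : List (List Int)) :
    get_down_hands N o = get_down_hands_alt N o := by
  by_cases hN : 3 ≤ N
  · have hA : get_down_hands N o = mkG N.toNat (cellF N o) := by
      have h0 : get_down_hands N o
          = (PySem.List.pyRange (N-3) 0 (-1)).foldl (fun g r =>
              (PySem.List.pyRange 1 (N-1) 1).foldl (fun g c =>
                  if gget o r c = 1 then gset g r c (gget g (r+1) c + 1) else g) g)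
            ((PySem.List.pyRange 1 (N-1) 1).foldl (fun g i =>
              if gget o (N-1) i = 0 ∧ gget o (N-2) i = 1
              then gset (if gget o (N-1) i = 1 ∧ gget o (N-2) i = 1 then gset g (N-2) i 2 else g) (N-2) i 1
              else (if gget o (N-1) i = 1 ∧ gget o (N-2) i = 1 then gset g (N-2) i 2 else g))
              (List.replicate N.toNat (List.replicate N.toNat (0:Int)))) := rfl
      rw [h0, replicate_eq_mkG, stageA1 N o hN, stageA2 N o hN]
    have hcols : (PySem.List.pyRange 0 N 1).map (columnB N o)
        = (List.range N.toNat).map (fun c => (List.range N.toNat).map (fun r => cellF N o r c)) := by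
      rw [PySem.List.pyRange_zero, List.map_map]
      apply List.map_congr_left
      intro c _
      simp only [Function.comp_apply]
      exact columnB_eq N o c hN
    have hB : get_down_hands_alt N o = mkG N.toNat (cellF N o) := by
      have h0 : get_down_hands_alt N o
          = (PySem.List.pyRange 0 N 1).map (fun r =>
              (PySem.List.pyRange 0 N 1).map (fun c =>
                gget ((PySem.List.pyRange 0 N 1).map (columnB N o)) c r)) := rfl
      rw [h0, hcols, PySem.List.pyRange_zero, List.map_map]
      unfold mkG
      apply List.map_congr_left
      intro r hr
      simp only [Function.comp_apply]
      rw [List.map_map]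
      apply List.map_congr_left
      intro c hc
      simp only [Function.comp_apply]
      unfold gget
      simp only [Int.toNat_natCast]
      rw [PySem.List.getD_map_range _ _ _ _ (List.mem_range.mp hc),
        PySem.List.getD_map_range _ _ _ _ (List.mem_range.mp hr)]
    rw [hA, hB]
  · have hA : get_down_hands N o = List.replicate N.toNat (List.replicate N.toNat 0) := by
      have h0 : get_down_hands N o
          = (PySem.List.pyRange (N-3) 0 (-1)).foldl (fun g r =>
              (PySem.List.pyRange 1 (N-1) 1).foldl (fun g c =>
                  if gget o r c = 1 then gset g r c (gget g (r+1) c + 1) else g) g)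
            ((PySem.List.pyRange 1 (N-1) 1).foldl (fun g i =>
              if gget o (N-1) i = 0 ∧ gget o (N-2) i = 1
              then gset (if gget o (N-1) i = 1 ∧ gget o (N-2) i = 1 then gset g (N-2) i 2 else g) (N-2) i 1
              else (if gget o (N-1) i = 1 ∧ gget o (N-2) i = 1 then gset g (N-2) i 2 else g))
              (List.replicate N.toNat (List.replicate N.toNat (0:Int)))) := rfl
      rw [h0, PySem.List.pyRange_neg_one_eq_nil (by omega), PySem.List.pyRange_one_eq_nil (by omega)]
      rfl
    have hB : get_down_hands_alt N o = List.replicate N.toNat (List.replicate N.toNat 0) := by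
      have h0 : get_down_hands_alt N o
          = (PySem.List.pyRange 0 N 1).map (fun r =>
              (PySem.List.pyRange 0 N 1).map (fun c =>
                gget ((PySem.List.pyRange 0 N 1).map (columnB N o)) c r)) := rfl
      rw [h0, PySem.List.pyRange_zero]
      apply List.ext_getElem
      · simp
      · intro i hi1 hi2
        have hiN : i < N.toNat := by simpa using hi2
        simp only [List.getElem_map, List.getElem_range, List.getElem_replicate]
        apply List.ext_getElem
        · simp
        · intro j hj1 hj2
          have hjN : j < N.toNat := by simpa using hj2
          simp only [List.getElem_map, List.getElem_range, List.getElem_replicate]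
          rw [List.map_map]
          unfold gget
          simp only [Int.toNat_natCast]
          rw [PySem.List.getD_map_range _ _ _ _ hjN]
          simp only [Function.comp_apply]
          rw [show columnB N o ((j:Nat):Int) = List.replicate N.toNat 0 from by
            unfold columnB; rw [if_pos (by omega)]]
          rw [List.getD_eq_getElem?_getD, List.getElem?_replicate]
          simp [hiN]
    rw [hA, hB]

-- ===== VERDICT (by name: the statement is the Claim_ definition above) =====
theorem get_down_hands_spec : Claim_equal_get_down_hands := by
  intro N o _ _
  unfold Spec_get_down_hands
  exact main_eq N o
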